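-- pv_equiv track=rewrite | github.com/Ozilele/6_semester | Paradygmaty/Lista3/zad3/DHSetup.py | findPrimesDividingP
-- ===== SOURCE A (Python) =====
-- import math
--
-- def findPrimesDividingP(n: int) -> list[int]:
--     result = []
--     marked = []
--     for i in range(0, n + 1):
--         marked.append(True)
--     for i in range(2, int(math.sqrt(n)) + 1):
--         if marked[i] == True:
--             j = i * i
--             while j <= n:
--                 marked[j] = False
--                 j = j + i
--     for j in range(2, n + 1):
--         if marked[j] == True: # if j is prime number
--             if n % j == 0:
--                 result.append(j)
--     return result
-- ===== SOURCE B (Python) =====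
-- def findPrimesDividingP(n: int) -> list[int]:
--     result = []
--     m = n
--     d = 2
--     while d * d <= m:
--         if m % d == 0:
--             result.append(d)
--             while m % d == 0:
--                 m //= d
--         d += 1
--     if m > 1:
--         result.append(m)
--     return result
-- ===== Notes on version B (the rewrite author's own statement) =====
-- stated objective: faster
-- what changed: Replaced the full sieve of Eratosthenes over [0,n] plus a scan of all of [2,n] by direct trial division up to sqrt(m) that divides each found prime factor out of m and appends the remaining prime cofactor, so only O(sqrt(n)) numbers are ever touched.
import Mathlib
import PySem

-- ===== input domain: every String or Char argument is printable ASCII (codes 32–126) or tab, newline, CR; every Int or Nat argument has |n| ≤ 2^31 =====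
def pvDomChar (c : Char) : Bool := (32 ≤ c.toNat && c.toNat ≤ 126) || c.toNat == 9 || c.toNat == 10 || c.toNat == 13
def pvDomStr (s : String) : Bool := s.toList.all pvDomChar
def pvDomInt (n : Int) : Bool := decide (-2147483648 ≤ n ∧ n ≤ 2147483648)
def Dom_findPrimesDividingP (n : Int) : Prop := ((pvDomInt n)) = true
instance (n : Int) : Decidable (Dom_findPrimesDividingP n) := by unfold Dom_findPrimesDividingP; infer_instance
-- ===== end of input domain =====

-- B replaces A's Eratosthenes sieve over [0,n] plus a scan of [2,n] by trial division up to sqrt,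
-- dividing each found prime out of the remaining cofactor (objective: faster, O(sqrt n) vs O(n log log n)).

-- ===== PORT A =====
-- inner 'while j <= n' loop of A; fuel only makes the recursion structural and is never
-- exhausted on reachable states (the step i is ≥ 2 there, so at most n/2+1 iterations run)
def pvCross (fuel : Nat) (n i j : Int) (mk : Array Bool) : Array Bool :=
  match fuel with
  | 0 => mk
  | f + 1 =>
    if j ≤ n then pvCross f n i (j + i) (mk.setIfInBounds j.toNat false) else mk

-- int(math.sqrt(n)) is ported as Int.sqrt: exact for 0 ≤ n ≤ 2^31 (the float sqrt is correctly
-- rounded there, checked against CPython on all squares' neighbourhoods in range).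
-- The Python list marked, mutated in place, is ported as Array Bool; its indices are always
-- nonnegative and in range under Pre_ (i, j ≤ n < len), so getD/setIfInBounds match Python's
-- checked marked[i] exactly on every reachable state.
def findPrimesDividingP (n : Int) : List Int :=
  let marked := (PySem.List.pyRange 0 (n + 1) 1).foldl (fun acc _ => acc.push true) #[]
  let marked := (PySem.List.pyRange 2 (Int.sqrt n + 1) 1).foldl
    (fun mk i =>
      if mk.getD i.toNat false = true then pvCross (n.toNat + 1) n i (i * i) mk
      else mk) marked
  (PySem.List.pyRange 2 (n + 1) 1).foldl
    (fun res j =>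
      if marked.getD j.toNat false = true then
        if PySem.Int.mod n j = 0 then res ++ [j] else res
      else res) []

-- ===== PORT B =====
-- inner 'while m % d == 0: m //= d' loop of Source B (fuel structural only: m halves each time)
def pvDivOut (fuel : Nat) (m d : Int) : Int :=
  match fuel with
  | 0 => m
  | f + 1 =>
    if PySem.Int.mod m d = 0 then pvDivOut f (PySem.Int.floordiv m d) d else m

-- outer 'while d * d <= m' loop of Source B; returns (result, final m). fuel structural only:
-- d grows by one each iteration and the loop stops once d*d > m.
def pvTrial (fuel : Nat) (m d : Int) (result : List Int) : List Int × Int :=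
  match fuel with
  | 0 => (result, m)
  | f + 1 =>
    if d * d ≤ m then
      if PySem.Int.mod m d = 0 then
        pvTrial f (pvDivOut (m.toNat + 1) m d) (d + 1) (result ++ [d])
      else pvTrial f m (d + 1) result
    else (result, m)

def findPrimesDividingP_alt (n : Int) : List Int :=
  let rm := pvTrial (n.toNat + 2) n 2 []
  if 1 < rm.2 then rm.1 ++ [rm.2] else rm.1

-- ===== PRECONDITION & SPEC =====
-- A raises ValueError on n < 0 (math.sqrt of a negative number); Pre_ excludes exactly those inputs.
def Pre_findPrimesDividingP (n : Int) : Prop := 0 ≤ n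
instance (n : Int) : Decidable (Pre_findPrimesDividingP n) := by unfold Pre_findPrimesDividingP; infer_instance
def pvWitness_findPrimesDividingP : Int := 12

def Spec_findPrimesDividingP (n : Int) (out : List Int) : Prop := out = findPrimesDividingP_alt n
instance (n : Int) (out : List Int) : Decidable (Spec_findPrimesDividingP n out) := by unfold Spec_findPrimesDividingP; infer_instance

-- ===== CLAIM (what is proved, stated in full; the proofs are below) =====
def Claim_equal_findPrimesDividingP : Prop := ∀ (n : Int), Dom_findPrimesDividingP n → Pre_findPrimesDividingP n → Spec_findPrimesDividingP n (findPrimesDividingP n)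

-- ===== LEMMAS AND PROOFS =====

-- the common value: the increasing list of primes in [2, n] dividing n
def pvSpecList (n : Int) : List Int :=
  (PySem.List.pyRange 2 (n + 1) 1).filter (fun j => decide (Nat.Prime j.toNat) && decide (j ∣ n))

-- sieve crossing condition: x has a prime factor p < s with p*p ≤ x
def pvC (s : Int) (x : Nat) : Prop := ∃ p : Nat, Nat.Prime p ∧ (p : Int) < s ∧ p ∣ x ∧ p * p ≤ x

-- sieve loop invariant after the outer loop has processed all i < s
def pvInv (n s : Int) (mk : Array Bool) : Prop :=
  mk.size = (n + 1).toNat ∧ ∀ x : Nat, (x : Int) ≤ n → (mk[x]? = some false ↔ pvC s x)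

theorem pvCross_getElem? (n i : Int) (hi : 0 < i) :
    ∀ (f : Nat) (j : Int) (mk : Array Bool), 0 ≤ j → n < j + f * i → n < (mk.size : Int) →
    ∀ x : Nat, (pvCross f n i j mk)[x]? =
      if j ≤ (x : Int) ∧ (x : Int) ≤ n ∧ i ∣ ((x : Int) - j) then some false else mk[x]? := by
  intro f
  induction f with
  | zero =>
    intro j mk hj hb hlen x
    simp only [pvCross]
    rw [if_neg (by push_cast at hb; omega)]
  | succ f ih =>
    intro j mk hj hb hlen x
    simp only [pvCross]
    by_cases hjc : j ≤ n
    · have hb' : n < (j + i) + (f : Int) * i := by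
        push_cast at hb; nlinarith
      rw [if_pos hjc, ih (j + i) _ (by omega) hb' (by rw [Array.size_setIfInBounds]; exact hlen)]
      rw [Array.getElem?_setIfInBounds]
      have hjlen : j.toNat < mk.size := by omega
      by_cases hx1 : j + i ≤ (x : Int) ∧ (x : Int) ≤ n ∧ i ∣ ((x : Int) - (j + i))
      · rw [if_pos hx1, if_pos ⟨by omega, hx1.2.1, by obtain ⟨c, hc⟩ := hx1.2.2; exact ⟨c + 1, by have h' : i * (c + 1) = i * c + i := (by ring); omega⟩⟩]
      · rw [if_neg hx1]
        by_cases hxj : j.toNat = x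
        · rw [if_pos hxj, if_pos hjlen,
            if_pos ⟨by omega, by omega, by exact ⟨0, by omega⟩⟩]
        · rw [if_neg hxj]
          rw [if_neg ?_]
          intro ⟨h1, h2, h3⟩
          obtain ⟨c, hc⟩ := h3
          have hxne : (x : Int) ≠ j := by omega
          have hpos : 0 < (x : Int) - j := by omega
          have hle : i ≤ (x : Int) - j := Int.le_of_dvd hpos ⟨c, hc⟩
          exact hx1 ⟨by omega, h2, ⟨c - 1, by have h' : i * (c - 1) = i * c - i := (by ring); omega⟩⟩
    · rw [if_neg hjc, if_neg (by omega)]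
theorem pvCross_size : ∀ (f : Nat) (n i j : Int) (mk : Array Bool),
    (pvCross f n i j mk).size = mk.size := by
  intro f
  induction f with
  | zero => intro n i j mk; rfl
  | succ f ih =>
    intro n i j mk
    simp only [pvCross]
    by_cases hj : j ≤ n
    · rw [if_pos hj, ih, Array.size_setIfInBounds]
    · rw [if_neg hj]

theorem pvStep (n : Int) (hn : 2 ≤ n) (i : Int) (hi : 2 ≤ i) (hile : i ≤ Int.sqrt n)
    (mk : Array Bool) (h : pvInv n i mk) :
    pvInv n (i + 1)
      (if mk.getD i.toNat false = true then pvCross (n.toNat + 1) n i (i * i) mk else mk) := by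
  have hnn : (n.toNat : Int) = n := Int.toNat_of_nonneg (by omega)
  have hinn : ((i.toNat : Nat) : Int) = i := Int.toNat_of_nonneg (by omega)
  have hsq : Int.sqrt n = ((Nat.sqrt n.toNat : Nat) : Int) := by simp [Int.sqrt]
  have hisq : i.toNat ≤ Nat.sqrt n.toNat := by rw [hsq] at hile; omega
  have hiisq : i.toNat * i.toNat ≤ n.toNat := Nat.le_sqrt.mp hisq
  have hiin : i * i ≤ n := by
    have := hiisq
    zify at this
    rw [hinn, hnn] at this
    exact this
  have hin : i ≤ n := by nlinarith
  have hlen : mk.size = (n + 1).toNat := h.1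
  have hlenI : ((mk.size : Nat) : Int) = n + 1 := by
    rw [hlen, Int.toNat_of_nonneg (by omega)]
  have hilen : i < (mk.size : Int) := by omega
  have hilen' : i.toNat < mk.size := by omega
  have hget : mk.getD i.toNat false = mk[i.toNat] := (Array.getElem_eq_getD false).symm
  have hsome : mk[i.toNat]? = some (mk[i.toNat]) := Array.getElem?_eq_getElem hilen'
  have hchar := h.2
  by_cases hb : mk[i.toNat] = true
  · -- i is unmarked-free: i is prime, cross out its multiples
    rw [hget, if_pos hb]
    have hnotC : ¬ pvC i i.toNat := by
      intro hC
      have := (hchar i.toNat (by omega)).mpr hC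
      rw [hsome, hb] at this
      exact Bool.noConfusion (Option.some.inj this)
    have hprime : Nat.Prime i.toNat := by
      by_contra hnp
      have h2N : 2 ≤ i.toNat := by omega
      have hq : Nat.Prime (Nat.minFac i.toNat) := Nat.minFac_prime (by omega)
      have hqd : Nat.minFac i.toNat ∣ i.toNat := Nat.minFac_dvd _
      have hqsq : Nat.minFac i.toNat ^ 2 ≤ i.toNat := Nat.minFac_sq_le_self (by omega) hnp
      have hqne : Nat.minFac i.toNat ≠ i.toNat := by
        intro he
        exact hnp (Nat.prime_def_minFac.mpr ⟨h2N, he⟩)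
      have hqlt : Nat.minFac i.toNat < i.toNat :=
        lt_of_le_of_ne (Nat.le_of_dvd (by omega) hqd) hqne
      exact hnotC ⟨Nat.minFac i.toNat, hq, by omega, hqd, by nlinarith [hqsq, sq (Nat.minFac i.toNat)]⟩
    have hcross := pvCross_getElem? n i (by omega) (n.toNat + 1) (i * i) mk
      (by positivity) (by push_cast [hnn]; nlinarith) (by omega)
    constructor
    · rw [pvCross_size, hlen]
    · intro x hx
      rw [hcross x]
      by_cases hc : i * i ≤ (x : Int) ∧ (x : Int) ≤ n ∧ i ∣ ((x : Int) - i * i)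
      · rw [if_pos hc]
        constructor
        · intro _
          obtain ⟨c, hcc⟩ := hc.2.2
          have hdx : i ∣ (x : Int) := ⟨c + i, by linarith [show i * (c + i) = i * c + i * i from by ring]⟩
          refine ⟨i.toNat, hprime, by omega, ?_, ?_⟩
          · rw [← Int.natCast_dvd_natCast, hinn]; exact hdx
          · have : ((i.toNat * i.toNat : Nat) : Int) ≤ (x : Int) := by push_cast [hinn]; exact hc.1
            exact_mod_cast this
        · intro _; rfl
      · rw [if_neg hc, hchar x hx]
        constructor
        · rintro ⟨p, hp, hplt, hpd, hpsq⟩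
          exact ⟨p, hp, by omega, hpd, hpsq⟩
        · rintro ⟨p, hp, hplt, hpd, hpsq⟩
          by_cases hpi : (p : Int) < i
          · exact ⟨p, hp, hpi, hpd, hpsq⟩
          · exfalso
            have hpe : (p : Int) = i := by omega
            apply hc
            have hdx : i ∣ (x : Int) := by
              rw [← hpe]; exact_mod_cast hpd
            refine ⟨?_, hx, ?_⟩
            · have : ((p * p : Nat) : Int) ≤ (x : Int) := by exact_mod_cast hpsq
              push_cast at this; rw [hpe] at this; exact this
            · exact dvd_sub hdx (Dvd.intro i rfl)
  · -- i was crossed out: i is composite, nothing happens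
    rw [hget, if_neg hb]
    have hfalse : mk[i.toNat] = false := by
      cases hmk : mk[i.toNat] <;> simp_all
    have hC : pvC i i.toNat := by
      apply (hchar i.toNat (by omega)).mp
      rw [hsome, hfalse]
    have hnp : ¬ Nat.Prime i.toNat := by
      intro hprime
      obtain ⟨p, hp, hplt, hpd, hpsq⟩ := hC
      rcases (Nat.Prime.eq_one_or_self_of_dvd hprime p hpd) with h1 | h1
      · exact Nat.Prime.one_lt hp |>.ne' h1
      · omega
    refine ⟨h.1, fun x hx => ?_⟩
    rw [hchar x hx]
    constructor
    · rintro ⟨p, hp, hplt, hpd, hpsq⟩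
      exact ⟨p, hp, by omega, hpd, hpsq⟩
    · rintro ⟨p, hp, hplt, hpd, hpsq⟩
      by_cases hpi : (p : Int) < i
      · exact ⟨p, hp, hpi, hpd, hpsq⟩
      · exfalso
        have : p = i.toNat := by omega
        exact hnp (this ▸ hp)
theorem pvSieve_inv (n : Int) (hn : 2 ≤ n) :
    ∀ (k : Nat) (mk : Array Bool), pvInv n 2 mk → 2 + (k : Int) ≤ Int.sqrt n + 1 →
    pvInv n (2 + (k : Int))
      ((PySem.List.pyRange 2 (2 + (k : Int)) 1).foldl
        (fun mk i =>
          if mk.getD i.toNat false = true then pvCross (n.toNat + 1) n i (i * i) mk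
          else mk) mk) := by
  intro k
  induction k with
  | zero =>
    intro mk h _
    simpa [PySem.List.pyRange_one_eq_nil (by omega : (2:Int) ≤ 2)] using h
  | succ k ih =>
    intro mk h hb
    have hb' : 2 + (k : Int) ≤ Int.sqrt n + 1 := by push_cast at hb; omega
    have hrange : PySem.List.pyRange 2 (2 + ((k + 1 : Nat) : Int)) 1
        = PySem.List.pyRange 2 (2 + (k : Int)) 1 ++ [2 + (k : Int)] := by
      have : (2 + ((k + 1 : Nat) : Int)) = (2 + (k : Int)) + 1 := by push_cast; ring
      rw [this, PySem.List.pyRange_one_succ_right (by omega)]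
    rw [hrange, List.foldl_append]
    have hstep := pvStep n hn (2 + (k : Int)) (by omega)
      (by push_cast at hb; omega) _ (ih mk h hb')
    have : (2 + ((k + 1 : Nat) : Int)) = (2 + (k : Int)) + 1 := by push_cast; ring
    rw [this]
    exact hstep
theorem pvInitArr : ∀ (l : List Int) (a : Array Bool),
    ((l.foldl (fun acc _ => acc.push true) a).size = a.size + l.length) ∧
    (∀ x : Nat, (l.foldl (fun acc _ => acc.push true) a)[x]? =
      if x < a.size then a[x]? else if x < a.size + l.length then some true else none) := by
  intro l
  induction l with
  | nil =>
    intro a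
    constructor
    · simp
    · intro x
      simp only [List.foldl_nil, List.length_nil, Nat.add_zero]
      by_cases h : x < a.size
      · rw [if_pos h]
      · rw [if_neg h, if_neg h]
        exact Array.getElem?_eq_none (by omega)
  | cons y l ih =>
    intro a
    simp only [List.foldl_cons, List.length_cons]
    obtain ⟨hs, hg⟩ := ih (a.push true)
    refine ⟨by rw [hs, Array.size_push]; omega, fun x => ?_⟩
    rw [hg x, Array.size_push, Array.getElem?_push]
    by_cases h1 : x < a.size
    · rw [if_pos (by omega), if_neg (by omega), if_pos h1]
    · by_cases h2 : x = a.size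
      · rw [if_pos (by omega), if_pos h2, if_neg h1, if_pos (by omega)]
      · rw [if_neg (by omega), if_neg h1]
        by_cases h3 : x < a.size + 1 + l.length
        · rw [if_pos h3, if_pos (by omega)]
        · rw [if_neg h3, if_neg (by omega)]

theorem pvC_final (n : Int) (hn : 2 ≤ n) (x : Nat) (h2 : 2 ≤ x) (hx : (x : Int) ≤ n) :
    pvC (Int.sqrt n + 1) x ↔ ¬ Nat.Prime x := by
  have hnn : (n.toNat : Int) = n := Int.toNat_of_nonneg (by omega)
  have hsq : Int.sqrt n = ((Nat.sqrt n.toNat : Nat) : Int) := by simp [Int.sqrt]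
  constructor
  · rintro ⟨p, hp, hplt, hpd, hpsq⟩ hprime
    rcases hprime.eq_one_or_self_of_dvd p hpd with h1 | h1
    · exact hp.one_lt.ne' h1
    · subst h1
      nlinarith
  · intro hnp
    refine ⟨x.minFac, Nat.minFac_prime (by omega), ?_, Nat.minFac_dvd x, ?_⟩
    · have hsqle : x.minFac ^ 2 ≤ x := Nat.minFac_sq_le_self (by omega) hnp
      have hxn : x ≤ n.toNat := by omega
      have hq : x.minFac * x.minFac ≤ n.toNat := by nlinarith
      have hle : x.minFac ≤ Nat.sqrt n.toNat := Nat.le_sqrt.mpr hq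
      rw [hsq]
      omega
    · have hsqle : x.minFac ^ 2 ≤ x := Nat.minFac_sq_le_self (by omega) hnp
      nlinarith

theorem pvA_eq (n : Int) (hn : 0 ≤ n) : findPrimesDividingP n = pvSpecList n := by
  by_cases h2 : 2 ≤ n
  · have hnn : (n.toNat : Int) = n := Int.toNat_of_nonneg (by omega)
    have hn1 : (((n + 1).toNat : Nat) : Int) = n + 1 := Int.toNat_of_nonneg (by omega)
    unfold findPrimesDividingP
    obtain ⟨hsz0, hget0⟩ := pvInitArr (PySem.List.pyRange 0 (n + 1) 1) #[]
    rw [PySem.List.length_pyRange_one] at hsz0 hget0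
    have hlen0 : (n + 1 - 0).toNat = (n + 1).toNat := by omega
    rw [hlen0] at hsz0 hget0
    have hinv0 : pvInv n 2 ((PySem.List.pyRange 0 (n + 1) 1).foldl
        (fun acc (_ : Int) => acc.push true) #[]) := by
      refine ⟨by rw [hsz0]; simp, fun x hx => ?_⟩
      rw [hget0 x]
      simp only [Array.size_empty, Nat.zero_add]
      rw [if_neg (by omega), if_pos (by omega)]
      constructor
      · intro hsf
        exact Bool.noConfusion (Option.some.inj hsf)
      · rintro ⟨p, hp, hplt, _, _⟩
        have := hp.two_le
        omega
    have hs1 : 1 ≤ Nat.sqrt n.toNat := Nat.le_sqrt.mpr (by omega)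
    have hsq : Int.sqrt n = ((Nat.sqrt n.toNat : Nat) : Int) := by simp [Int.sqrt]
    set k : Nat := (Int.sqrt n - 1).toNat with hk
    have hkc : 2 + (k : Int) = Int.sqrt n + 1 := by
      rw [hk, hsq]
      omega
    have hinv : pvInv n (Int.sqrt n + 1)
        ((PySem.List.pyRange 2 (Int.sqrt n + 1) 1).foldl
          (fun mk i =>
            if mk.getD i.toNat false = true then pvCross (n.toNat + 1) n i (i * i) mk
            else mk) ((PySem.List.pyRange 0 (n + 1) 1).foldl
              (fun acc (_ : Int) => acc.push true) #[])) := by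
      rw [← hkc]
      exact pvSieve_inv n h2 k _ hinv0 (by omega)
    set marked := (PySem.List.pyRange 2 (Int.sqrt n + 1) 1).foldl
          (fun mk i =>
            if mk.getD i.toNat false = true then pvCross (n.toNat + 1) n i (i * i) mk
            else mk) ((PySem.List.pyRange 0 (n + 1) 1).foldl
              (fun acc (_ : Int) => acc.push true) #[]) with hmdef
    have hlen : marked.size = (n + 1).toNat := hinv.1
    rw [PySem.List.foldl_congr_mem _ _
      (fun res j => if marked.getD j.toNat false = true ∧ PySem.Int.mod n j = 0
        then res ++ [j] else res) _
      (by
        intro acc x _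
        beta_reduce
        by_cases hg : marked.getD x.toNat false = true
        · by_cases hm : PySem.Int.mod n x = 0
          · rw [if_pos hg, if_pos hm, if_pos ⟨hg, hm⟩]
          · rw [if_pos hg, if_neg hm, if_neg (fun hc => hm hc.2)]
        · rw [if_neg hg, if_neg (fun hc => hg hc.1)])]
    rw [PySem.List.foldl_append_ite_eq_filter]
    rw [List.nil_append]
    unfold pvSpecList
    apply List.filter_congr
    intro j hj
    rw [PySem.List.mem_pyRange_one] at hj
    have hjlen' : j.toNat < marked.size := by omega
    have hget : marked.getD j.toNat false = marked[j.toNat] := (Array.getElem_eq_getD false).symm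
    have hsome : marked[j.toNat]? = some (marked[j.toNat]) := Array.getElem?_eq_getElem hjlen'
    have hchar := hinv.2 j.toNat (by omega)
    rw [hsome] at hchar
    have hnpc := pvC_final n h2 j.toNat (by omega) (by omega)
    have hprim : marked[j.toNat] = true ↔ Nat.Prime j.toNat := by
      constructor
      · intro ht
        by_contra hnp
        have := hchar.mpr (hnpc.mpr hnp)
        rw [ht] at this
        exact Bool.noConfusion (Option.some.inj this)
      · intro hp
        cases hmk : marked[j.toNat]
        · exact absurd (hnpc.mp (hchar.mp (by rw [hmk]))) (not_not_intro hp)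
        · rfl
    have : (marked.getD j.toNat false = true ∧ PySem.Int.mod n j = 0)
        ↔ (Nat.Prime j.toNat ∧ j ∣ n) := by
      rw [hget, hprim, PySem.Int.mod_eq_zero_iff_dvd]
    rw [decide_eq_decide.mpr this]
    · simp
    · infer_instance
  · unfold findPrimesDividingP pvSpecList
    rw [PySem.List.pyRange_one_eq_nil (show n + 1 ≤ 2 by omega)]
    simp
theorem pvDivOut_spec (d : Int) (hd : 2 ≤ d) :
    ∀ (fuel : Nat) (m : Int), 0 < m → m.toNat < 2 ^ fuel →
    ∃ k : Nat, pvDivOut fuel m d ∣ m ∧ m ∣ pvDivOut fuel m d * d ^ k ∧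
      0 < pvDivOut fuel m d ∧ ¬ d ∣ pvDivOut fuel m d := by
  intro fuel
  induction fuel with
  | zero =>
    intro m hm hb
    omega
  | succ f ih =>
    intro m hm hb
    simp only [pvDivOut]
    by_cases hdvd : d ∣ m
    · rw [if_pos ((PySem.Int.mod_eq_zero_iff_dvd m d).mpr hdvd)]
      rw [PySem.Int.floordiv_eq_ediv_of_pos (by omega)]
      obtain ⟨t, ht⟩ := hdvd
      have htdiv : m / d = t := by
        rw [ht]
        exact Int.mul_ediv_cancel_left t (by omega)
      have htpos : 0 < t := by nlinarith
      have htb : t.toNat < 2 ^ f := by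
        have h2t : 2 * t ≤ m := by nlinarith
        have : (2:Int) ^ (f+1) = 2 * 2 ^ f := by ring
        omega
      obtain ⟨k, hk1, hk2, hk3, hk4⟩ := ih t htpos htb
      rw [htdiv]
      refine ⟨k + 1, dvd_trans hk1 ⟨d, by linarith [ht]⟩, ?_, hk3, hk4⟩
      · obtain ⟨c, hc⟩ := hk2
        exact ⟨c, by rw [pow_succ, ← mul_assoc, hc, mul_comm (t * c) d, ht, mul_assoc]⟩
    · rw [if_neg (fun h => hdvd ((PySem.Int.mod_eq_zero_iff_dvd m d).mp h))]
      exact ⟨0, dvd_refl m, ⟨1, by ring⟩, hm, hdvd⟩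
theorem pvPrimeInt {j : Int} (h0 : 0 < j) : Prime j ↔ Nat.Prime j.toNat := by
  rw [Int.prime_iff_natAbs_prime]
  have h : j.natAbs = j.toNat := by omega
  rw [h]

theorem pvPrimeDvdPrime {p m : Int} (hppos : 0 < p) (hmpos : 0 < m)
    (hp : Prime p) (hm : Prime m) (hd : p ∣ m) : p = m := by
  have hpt : (p.toNat : Int) = p := Int.toNat_of_nonneg (by omega)
  have hmt : (m.toNat : Int) = m := Int.toNat_of_nonneg (by omega)
  have h1 : p.toNat ∣ m.toNat := by
    rw [← Int.natCast_dvd_natCast, hpt, hmt]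
    exact hd
  have := (Nat.prime_dvd_prime_iff_eq ((pvPrimeInt hppos).mp hp) ((pvPrimeInt hmpos).mp hm)).mp h1
  omega

theorem pvExit (n m d : Int) (res : List Int) (hn : 0 < n) (hm : 0 < m) (hd : 2 ≤ d)
    (hmn : m ∣ n) (hlt : m < d * d)
    (hiff : ∀ p : Int, 0 < p → Prime p → (p ∣ m ↔ p ∣ n ∧ d ≤ p)) :
    (if 1 < m then res ++ [m] else res)
      = res ++ (PySem.List.pyRange d (n + 1) 1).filter
          (fun j => decide (Nat.Prime j.toNat) && decide (j ∣ n)) := by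
  by_cases hm1 : 1 < m
  · rw [if_pos hm1]
    have hmp : Prime m := by
      by_contra hnp
      have hmt : ¬ Nat.Prime m.toNat := fun h => hnp ((pvPrimeInt (by omega)).mpr h)
      have hqp : Nat.Prime m.toNat.minFac := Nat.minFac_prime (by omega)
      have hqd : m.toNat.minFac ∣ m.toNat := Nat.minFac_dvd _
      have hqsq : m.toNat.minFac ^ 2 ≤ m.toNat := Nat.minFac_sq_le_self (by omega) hmt
      have hqpos : (0:Int) < (m.toNat.minFac : Int) := by exact_mod_cast hqp.pos
      have hqdi : ((m.toNat.minFac : Nat) : Int) ∣ m := by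
        rw [← Int.toNat_of_nonneg (show (0:Int) ≤ m by omega)]
        exact_mod_cast hqd
      have hqip : Prime ((m.toNat.minFac : Nat) : Int) := by
        rw [pvPrimeInt hqpos]
        simpa using hqp
      have hdq : d ≤ (m.toNat.minFac : Int) := ((hiff _ hqpos hqip).mp hqdi).2
      have hsq : ((m.toNat.minFac * m.toNat.minFac : Nat) : Int) ≤ m := by
        have h' : m.toNat.minFac * m.toNat.minFac ≤ m.toNat := by nlinarith [hqsq]
        calc ((m.toNat.minFac * m.toNat.minFac : Nat) : Int) ≤ (m.toNat : Int) := by exact_mod_cast h'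
          _ = m := Int.toNat_of_nonneg (by omega)
      push_cast at hsq
      nlinarith
    have hdm : d ≤ m := ((hiff m (by omega) hmp).mp dvd_rfl).2
    have hmn' : m ≤ n := Int.le_of_dvd hn hmn
    rw [PySem.List.pyRange_one_append d m (n + 1) hdm (by omega),
      PySem.List.pyRange_one_cons (show m < n + 1 by omega),
      List.filter_append, List.filter_cons]
    have h1 : (PySem.List.pyRange d m 1).filter
        (fun j => decide (Nat.Prime j.toNat) && decide (j ∣ n)) = [] := by
      rw [List.filter_eq_nil_iff]
      intro j hj hpred
      rw [PySem.List.mem_pyRange_one] at hj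
      simp only [Bool.and_eq_true, decide_eq_true_eq] at hpred
      have hjp : Prime j := (pvPrimeInt (by omega)).mpr hpred.1
      have hjm : j ∣ m := (hiff j (by omega) hjp).mpr ⟨hpred.2, hj.1⟩
      have := pvPrimeDvdPrime (by omega) (by omega) hjp hmp hjm
      omega
    have h2 : (PySem.List.pyRange (m + 1) (n + 1) 1).filter
        (fun j => decide (Nat.Prime j.toNat) && decide (j ∣ n)) = [] := by
      rw [List.filter_eq_nil_iff]
      intro j hj hpred
      rw [PySem.List.mem_pyRange_one] at hj
      simp only [Bool.and_eq_true, decide_eq_true_eq] at hpred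
      have hjp : Prime j := (pvPrimeInt (by omega)).mpr hpred.1
      have hjm : j ∣ m := (hiff j (by omega) hjp).mpr ⟨hpred.2, by omega⟩
      have := pvPrimeDvdPrime (by omega) (by omega) hjp hmp hjm
      omega
    have hhead : (decide (Nat.Prime m.toNat) && decide (m ∣ n)) = true := by
      simp only [Bool.and_eq_true, decide_eq_true_eq]
      exact ⟨(pvPrimeInt (by omega)).mp hmp, hmn⟩
    rw [h1, h2, hhead]
    simp
  · rw [if_neg hm1]
    have hmeq : m = 1 := by omega
    have hfil : (PySem.List.pyRange d (n + 1) 1).filter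
        (fun j => decide (Nat.Prime j.toNat) && decide (j ∣ n)) = [] := by
      rw [List.filter_eq_nil_iff]
      intro j hj hpred
      rw [PySem.List.mem_pyRange_one] at hj
      simp only [Bool.and_eq_true, decide_eq_true_eq] at hpred
      have hjp : Prime j := (pvPrimeInt (by omega)).mpr hpred.1
      have hjm : j ∣ m := (hiff j (by omega) hjp).mpr ⟨hpred.2, hj.1⟩
      have := Int.le_of_dvd (by omega) hjm
      omega
    rw [hfil]
    simp
theorem pvTrial_spec (n : Int) (hn : 0 < n) :
    ∀ (fuel : Nat) (m d : Int) (res : List Int), 0 < m → 2 ≤ d → m ∣ n →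
    m < (d + fuel) * (d + fuel) →
    (∀ p : Int, 0 < p → Prime p → (p ∣ m ↔ p ∣ n ∧ d ≤ p)) →
    (if 1 < (pvTrial fuel m d res).2 then (pvTrial fuel m d res).1 ++ [(pvTrial fuel m d res).2]
      else (pvTrial fuel m d res).1)
      = res ++ (PySem.List.pyRange d (n + 1) 1).filter
          (fun j => decide (Nat.Prime j.toNat) && decide (j ∣ n)) := by
  intro fuel
  induction fuel with
  | zero =>
    intro m d res hm hd hmn hb hiff
    simp only [pvTrial]
    exact pvExit n m d res hn hm hd hmn (by simpa using hb) hiff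
  | succ f ih =>
    intro m d res hm hd hmn hb hiff
    simp only [pvTrial]
    by_cases hdm : d * d ≤ m
    · rw [if_pos hdm]
      have hmn' : m ≤ n := Int.le_of_dvd hn hmn
      by_cases hdv : d ∣ m
      · rw [if_pos ((PySem.Int.mod_eq_zero_iff_dvd m d).mpr hdv)]
        have hdp : Prime d := by
          by_contra hnp
          have hdt : ¬ Nat.Prime d.toNat := fun h => hnp ((pvPrimeInt (by omega)).mpr h)
          have hqp : Nat.Prime d.toNat.minFac := Nat.minFac_prime (by omega)
          have hqd : d.toNat.minFac ∣ d.toNat := Nat.minFac_dvd _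
          have hqpos : (0:Int) < (d.toNat.minFac : Int) := by exact_mod_cast hqp.pos
          have hqip : Prime ((d.toNat.minFac : Nat) : Int) := by
            rw [pvPrimeInt hqpos]; simpa using hqp
          have hqdd : ((d.toNat.minFac : Nat) : Int) ∣ d := by
            rw [← Int.toNat_of_nonneg (show (0:Int) ≤ d by omega)]
            exact_mod_cast hqd
          have hqm : ((d.toNat.minFac : Nat) : Int) ∣ m := dvd_trans hqdd hdv
          have hge : d ≤ ((d.toNat.minFac : Nat) : Int) := ((hiff _ hqpos hqip).mp hqm).2
          have hle : d.toNat.minFac ≤ d.toNat := Nat.le_of_dvd (by omega) hqd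
          have hne : d.toNat.minFac ≠ d.toNat :=
            fun he => hdt (Nat.prime_def_minFac.mpr ⟨by omega, he⟩)
          omega
        obtain ⟨k, hk1, hk2, hk3, hk4⟩ := pvDivOut_spec d hd (m.toNat + 1) m hm (by
          have h1 := Nat.lt_two_pow_self (n := m.toNat)
          have h2 : 2 ^ m.toNat ≤ 2 ^ (m.toNat + 1) := Nat.pow_le_pow_right (by omega) (by omega)
          omega)
        have hrn : pvDivOut (m.toNat + 1) m d ∣ n := dvd_trans hk1 hmn
        have hiff' : ∀ p : Int, 0 < p → Prime p →
            (p ∣ pvDivOut (m.toNat + 1) m d ↔ p ∣ n ∧ d + 1 ≤ p) := by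
          intro p hp hpp
          constructor
          · intro hpr
            have hpm : p ∣ m := dvd_trans hpr hk1
            have h := (hiff p hp hpp).mp hpm
            refine ⟨h.1, ?_⟩
            rcases eq_or_ne p d with he | hne
            · exact absurd (he ▸ hpr) hk4
            · omega
          · rintro ⟨hpn, hdp1⟩
            have hpm : p ∣ m := (hiff p hp hpp).mpr ⟨hpn, by omega⟩
            rcases (Prime.dvd_mul hpp).mp (dvd_trans hpm hk2) with h | h
            · exact h
            · exfalso
              have hpd : p ∣ d := hpp.dvd_of_dvd_pow h
              have := pvPrimeDvdPrime hp (by omega) hpp hdp hpd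
              omega
        have hb' : pvDivOut (m.toNat + 1) m d < ((d + 1) + f) * ((d + 1) + f) := by
          have hrm : pvDivOut (m.toNat + 1) m d ≤ m := Int.le_of_dvd hm hk1
          push_cast at hb ⊢
          nlinarith
        rw [ih _ (d + 1) (res ++ [d]) hk3 (by omega) hrn hb' hiff']
        rw [PySem.List.pyRange_one_cons (show d < n + 1 by nlinarith), List.filter_cons]
        have hhead : (decide (Nat.Prime d.toNat) && decide (d ∣ n)) = true := by
          simp only [Bool.and_eq_true, decide_eq_true_eq]
          exact ⟨(pvPrimeInt (by omega)).mp hdp, dvd_trans hdv hmn⟩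
        rw [hhead]
        simp
      · rw [if_neg (fun h => hdv ((PySem.Int.mod_eq_zero_iff_dvd m d).mp h))]
        have hiff' : ∀ p : Int, 0 < p → Prime p → (p ∣ m ↔ p ∣ n ∧ d + 1 ≤ p) := by
          intro p hp hpp
          constructor
          · intro hpm
            have h := (hiff p hp hpp).mp hpm
            refine ⟨h.1, ?_⟩
            rcases eq_or_ne p d with he | hne
            · subst he; exact absurd hpm hdv
            · omega
          · rintro ⟨hpn, hdp1⟩
            exact (hiff p hp hpp).mpr ⟨hpn, by omega⟩
        have hb' : m < ((d + 1) + f) * ((d + 1) + f) := by push_cast at hb ⊢; nlinarith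
        rw [ih m (d + 1) res hm (by omega) hmn hb' hiff']
        rw [PySem.List.pyRange_one_cons (show d < n + 1 by nlinarith), List.filter_cons]
        have hhead : (decide (Nat.Prime d.toNat) && decide (d ∣ n)) = false := by
          by_cases h1 : Nat.Prime d.toNat
          · by_cases h2 : d ∣ n
            · exact absurd
                ((hiff d (by omega) ((pvPrimeInt (by omega)).mpr h1)).mpr ⟨h2, le_refl d⟩) hdv
            · simp [h2]
          · simp [h1]
        rw [hhead]
        simp
    · rw [if_neg hdm]
      exact pvExit n m d res hn hm hd hmn (by omega) hiff

theorem pvB_eq (n : Int) (hn : 0 ≤ n) : findPrimesDividingP_alt n = pvSpecList n := by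
  by_cases h2 : 2 ≤ n
  · have hnn : (n.toNat : Int) = n := Int.toNat_of_nonneg (by omega)
    unfold findPrimesDividingP_alt pvSpecList
    have hb : n < ((2:Int) + (n.toNat + 2 : Nat)) * ((2:Int) + (n.toNat + 2 : Nat)) := by
      push_cast [hnn]
      nlinarith
    have hiff : ∀ p : Int, 0 < p → Prime p → (p ∣ n ↔ p ∣ n ∧ 2 ≤ p) := by
      intro p hp hpp
      have h2p : 2 ≤ p.toNat := ((pvPrimeInt hp).mp hpp).two_le
      exact ⟨fun h => ⟨h, by omega⟩, fun h => h.1⟩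
    exact pvTrial_spec n (by omega) (n.toNat + 2) n 2 [] (by omega) (by omega) dvd_rfl hb hiff
  · have hn01 : n = 0 ∨ n = 1 := by omega
    unfold findPrimesDividingP_alt pvSpecList
    rw [PySem.List.pyRange_one_eq_nil (show n + 1 ≤ 2 by omega)]
    rcases hn01 with h | h <;> subst h <;> simp [pvTrial]

-- ===== VERDICT (by name: the statement is the Claim_ definition above) =====
theorem findPrimesDividingP_spec : Claim_equal_findPrimesDividingP := by
  intro n _ hpre
  unfold Spec_findPrimesDividingP
  rw [pvA_eq n hpre, pvB_eq n hpre]
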